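-- pv_equiv track=rewrite | github.com/dldxzx/MvGraphDTA | data_process.py | get_node_to_edge_index
-- ===== SOURCE A (Python) =====
-- def get_node_to_edge_index(node_list, edge_name):
--     node_edge_scatter_index = []
--     edge_node_scatter_index = []
--     node_edge_index = []
--     edge_node_index = []
--     for node in node_list:
--         for edge in edge_name:
--             if node == edge[0]:
--                 node_edge_index.append(edge_name.index(edge))
--                 node_edge_scatter_index.append(node)
--             if node == edge[1]:
--                 node_edge_index.append(edge_name.index(edge))
--                 node_edge_scatter_index.append(node)
--     for i in range(len(edge_name)):
--         edge_node_index.append(edge_name[i][0])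
--         edge_node_index.append(edge_name[i][1])
--         edge_node_scatter_index += [i] * 2
--     return node_edge_index, node_edge_scatter_index, edge_node_index, edge_node_scatter_index
-- ===== SOURCE B (Python) =====
-- def get_node_to_edge_index(node_list, edge_name):
--     # first occurrence index of each edge value (replaces edge_name.index inner scan)
--     first = {}
--     for j, e in enumerate(edge_name):
--         first.setdefault(e, j)
--     # per-edge endpoint hits in edge order, then grouped by endpoint node value
--     pairs = []
--     for e in edge_name:
--         f = first[e]
--         pairs.append((e[0], f))
--         pairs.append((e[1], f))
--     occ = {}
--     for v, f in pairs:
--         occ.setdefault(v, []).append(f)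
--     node_edge_index = []
--     node_edge_scatter_index = []
--     for n in node_list:
--         hits = occ.get(n, [])
--         node_edge_index += hits
--         node_edge_scatter_index += [n] * len(hits)
--     edge_node_index = []
--     edge_node_scatter_index = []
--     for j, e in enumerate(edge_name):
--         edge_node_index += [e[0], e[1]]
--         edge_node_scatter_index += [j, j]
--     return node_edge_index, node_edge_scatter_index, edge_node_index, edge_node_scatter_index
-- ===== Notes on version B (the rewrite author's own statement) =====
-- stated objective: faster
-- what changed: Replaces the node×edge double loop with its inner linear edge_name.index scan by a one-pass first-index dict plus a dict grouping edge hits by endpoint node, then emits per node by lookup.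
import Mathlib
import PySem

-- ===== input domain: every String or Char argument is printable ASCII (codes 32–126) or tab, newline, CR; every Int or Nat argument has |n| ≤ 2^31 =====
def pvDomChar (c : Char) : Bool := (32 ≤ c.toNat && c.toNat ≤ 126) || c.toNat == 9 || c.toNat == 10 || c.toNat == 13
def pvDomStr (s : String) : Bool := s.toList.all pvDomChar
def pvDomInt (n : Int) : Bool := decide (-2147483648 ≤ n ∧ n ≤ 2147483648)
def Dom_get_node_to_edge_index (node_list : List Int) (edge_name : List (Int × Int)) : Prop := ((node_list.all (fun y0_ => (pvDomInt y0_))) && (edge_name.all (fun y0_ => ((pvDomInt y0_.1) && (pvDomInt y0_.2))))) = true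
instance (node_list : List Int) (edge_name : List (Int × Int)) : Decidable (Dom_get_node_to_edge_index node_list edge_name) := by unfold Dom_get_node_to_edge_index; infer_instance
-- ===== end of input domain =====

-- B replaces A's node×edge double loop (with an inner edge_name.index scan) by dict-based
-- first-index and endpoint-grouping passes; equal return value, asymptotically faster.

-- ===== PORT A =====
-- A's node loop: for each node, for each edge, two sequential ifs appending
-- edge_name.index(edge) (first occurrence; always present, so getD is never taken) and node.
def get_node_to_edge_index (node_list : List Int) (edge_name : List (Int × Int)) : List Int × List Int × List Int × List Int :=
  let np := node_list.foldl (fun acc n =>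
    edge_name.foldl (fun acc e =>
      let acc1 := if n == e.1 then (acc.1 ++ [(((PySem.List.index? edge_name e).getD 0 : Nat) : Int)], acc.2 ++ [n]) else acc
      if n == e.2 then (acc1.1 ++ [(((PySem.List.index? edge_name e).getD 0 : Nat) : Int)], acc1.2 ++ [n]) else acc1) acc)
    (([] : List Int), ([] : List Int))
  -- for i in range(len(edge_name)): append edge_name[i][0], edge_name[i][1]; scatter += [i]*2
  let ep := (PySem.List.pyRange 0 (PySem.List.len edge_name) 1).foldl (fun acc i =>
      (acc.1 ++ [(PySem.List.pyGetD edge_name i (0, 0)).1] ++ [(PySem.List.pyGetD edge_name i (0, 0)).2],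
       acc.2 ++ [i, i]))
    (([] : List Int), ([] : List Int))
  (np.1, np.2, ep.1, ep.2)

-- ===== PORT B =====
def get_node_to_edge_index_alt (node_list : List Int) (edge_name : List (Int × Int)) : List Int × List Int × List Int × List Int :=
  let first : PySem.Dict (Int × Int) Int :=
    (PySem.List.enumerate edge_name).foldl (fun d p => d.setdefault p.2 p.1) PySem.Dict.empty
  let pairs : List (Int × Int) :=
    edge_name.foldl (fun acc e => acc ++ [(e.1, first.getD e 0), (e.2, first.getD e 0)]) []
  let occ : PySem.Dict Int (List Int) :=
    pairs.foldl (fun d p => d.modify p.1 [] (· ++ [p.2])) PySem.Dict.empty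
  let np := node_list.foldl (fun acc n =>
      let hits := occ.getD n []
      (acc.1 ++ hits, acc.2 ++ List.replicate hits.length n))
    (([] : List Int), ([] : List Int))
  let ep := (PySem.List.enumerate edge_name).foldl (fun acc p =>
      (acc.1 ++ [p.2.1, p.2.2], acc.2 ++ [p.1, p.1]))
    (([] : List Int), ([] : List Int))
  (np.1, np.2, ep.1, ep.2)

-- ===== PRECONDITION & SPEC =====
def Spec_get_node_to_edge_index (node_list : List Int) (edge_name : List (Int × Int)) (out : List Int × List Int × List Int × List Int) : Prop := out = get_node_to_edge_index_alt node_list edge_name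
instance (node_list : List Int) (edge_name : List (Int × Int)) (out : List Int × List Int × List Int × List Int) : Decidable (Spec_get_node_to_edge_index node_list edge_name out) := by unfold Spec_get_node_to_edge_index; infer_instance

-- ===== CLAIM (what is proved, stated in full; the proofs are below) =====
def Claim_equal_get_node_to_edge_index : Prop := ∀ (node_list : List Int) (edge_name : List (Int × Int)), Dom_get_node_to_edge_index node_list edge_name → Spec_get_node_to_edge_index node_list edge_name (get_node_to_edge_index node_list edge_name)

-- ===== LEMMAS AND PROOFS =====

-- helper: two lists all of whose elements are n, of equal length, are equal
theorem rep_eq {n : Int} {l1 l2 : List Int} (h : l1.length = l2.length)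
    (h1 : ∀ x ∈ l1, x = n) (h2 : ∀ x ∈ l2, x = n) : l1 = l2 := by
  have e1 : l1 = List.replicate l1.length n := List.eq_replicate_iff.mpr ⟨rfl, h1⟩
  have e2 : l2 = List.replicate l2.length n := List.eq_replicate_iff.mpr ⟨rfl, h2⟩
  rw [e1, e2, h]

-- the setdefault loop over enumerate computes the first-occurrence index (offset by s)
theorem first_get? (e : Int × Int) (l : List (Int × Int)) : ∀ (s : Int) (d : PySem.Dict (Int × Int) Int),
    ((PySem.List.enumerate l s).foldl (fun d p => d.setdefault p.2 p.1) d).get? e =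
      ((d.get? e).or ((PySem.List.index? l e).map (fun k => s + (k : Int)))) := by
  induction l with
  | nil => simp [PySem.List.enumerate_nil, PySem.List.index?]
  | cons x t ih =>
    intro s d
    rw [PySem.List.enumerate_cons, List.foldl_cons]
    by_cases hx : x = e
    · subst hx
      rw [ih, PySem.List.index?_cons_self]
      by_cases hc : d.contains x
      · rw [PySem.Dict.setdefault_of_contains _ _ hc]
        rcases Option.isSome_iff_exists.mp
          (show (d.get? x).isSome by rw [← PySem.Dict.contains_eq_isSome_get?]; exact hc) with ⟨v, hv⟩
        simp [hv]
      · rw [PySem.Dict.setdefault_of_not_contains _ _ (by simpa using hc)]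
        have hn : d.get? x = none := (PySem.Dict.get?_eq_none_iff_contains d x).mpr (by simpa using hc)
        simp [hn, PySem.Dict.get?_insert_self]
    · rw [ih, PySem.Dict.get?_setdefault_of_ne _ _ (fun h => hx h.symm),
        PySem.List.index?_cons_of_ne _ hx]
      cases d.get? e <;> cases PySem.List.index? t e <;> simp [Int.add_comm, Int.add_left_comm]

-- A's inner loop over any list, with a fixed per-edge value g, appends the flatMap of hits
theorem inner_fold (n : Int) (g : Int × Int → Int) (l : List (Int × Int)) :
    ∀ (xs ys : List Int),
    l.foldl (fun acc e =>
      let acc1 := if n == e.1 then (acc.1 ++ [g e], acc.2 ++ [n]) else acc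
      if n == e.2 then (acc1.1 ++ [g e], acc1.2 ++ [n]) else acc1) (xs, ys)
    = (xs ++ l.flatMap (fun e => (if n == e.1 then [g e] else []) ++ (if n == e.2 then [g e] else [])),
       ys ++ List.replicate (l.flatMap (fun e => (if n == e.1 then [g e] else []) ++ (if n == e.2 then [g e] else []))).length n) := by
  induction l with
  | nil => simp
  | cons e t ih =>
    intro xs ys
    simp only [List.foldl_cons, List.flatMap_cons]
    by_cases h1 : (n == e.1) = true <;> by_cases h2 : (n == e.2) = true <;>
      simp only [h1, h2, Bool.false_eq_true, if_true, if_false] <;>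
      rw [ih] <;>
      refine Prod.ext (by simp [List.append_assoc]) ?_ <;>
      simp only [List.append_assoc] <;>
      refine congrArg (ys ++ ·) (rep_eq (n := n) ?_ ?_ ?_) <;>
      simp [List.length_append, List.length_flatMap]

-- B's grouped per-node hit list is exactly A's per-node flatMap of first-occurrence indices
theorem hits_eq (edge_name : List (Int × Int)) (n : Int) :
    (((edge_name.foldl (fun acc e =>
        acc ++ [(e.1, ((PySem.List.enumerate edge_name).foldl (fun d p => d.setdefault p.2 p.1) PySem.Dict.empty).getD e 0),
                (e.2, ((PySem.List.enumerate edge_name).foldl (fun d p => d.setdefault p.2 p.1) PySem.Dict.empty).getD e 0)]) []).foldl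
        (fun d p => d.modify p.1 [] (· ++ [p.2])) PySem.Dict.empty).getD n [])
    = edge_name.flatMap (fun e =>
        (if n == e.1 then [(((PySem.List.index? edge_name e).getD 0 : Nat) : Int)] else [])
        ++ (if n == e.2 then [(((PySem.List.index? edge_name e).getD 0 : Nat) : Int)] else [])) := by
  have hF : ∀ e : Int × Int,
      ((PySem.List.enumerate edge_name).foldl (fun d p => d.setdefault p.2 p.1) PySem.Dict.empty).getD e 0
      = (((PySem.List.index? edge_name e).getD 0 : Nat) : Int) := by
    intro e
    rw [PySem.Dict.getD_eq_get?_getD, first_get?]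
    cases PySem.List.index? edge_name e <;> simp
  rw [PySem.List.foldl_append_eq_flatMap, PySem.Dict.getD_foldl_modify_append]
  simp only [PySem.Dict.getD_empty, List.nil_append, List.filter_flatMap, List.map_flatMap]
  refine congrArg (List.flatMap · edge_name) (funext fun e => ?_)
  rw [hF e]
  rcases e with ⟨a, b⟩
  by_cases h1 : a = n <;> by_cases h2 : b = n <;>
    have h1' : (n = a) = (a = n) := propext ⟨Eq.symm, Eq.symm⟩
  <;> have h2' : (n = b) = (b = n) := propext ⟨Eq.symm, Eq.symm⟩
  <;> simp [beq_iff_eq, h1', h2', h1, h2]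

-- ===== VERDICT (by name: the statement is the Claim_ definition above) =====
theorem get_node_to_edge_index_spec : Claim_equal_get_node_to_edge_index := by
  intro node_list edge_name _
  unfold Spec_get_node_to_edge_index
  unfold get_node_to_edge_index get_node_to_edge_index_alt
  simp only []
  refine congrArg₂ (fun (p q : List Int × List Int) => (p.1, p.2, q.1, q.2)) ?_ ?_
  · -- node part
    refine congrArg (fun f => List.foldl f (([] : List Int), ([] : List Int)) node_list) ?_
    funext acc n
    rw [show acc = (acc.1, acc.2) from rfl, inner_fold, hits_eq]
  · -- edge part
    rw [PySem.List.enumerate_eq_map_pyRange edge_name (0, 0), List.foldl_map]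
    refine congrArg (fun f => List.foldl f (([] : List Int), ([] : List Int)) (PySem.List.pyRange 0 (PySem.List.len edge_name) 1)) ?_
    funext acc i
    simp [List.append_assoc]
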